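-- pv_equiv track=rewrite | github.com/mfiros/echo-voice | backend/LambdaFunction/index.py | parse_combinations
-- ===== SOURCE A (Python) =====
-- import itertools
--
-- def parse_combinations(combinations_string):
--     """
--     Parses combinations string and generates a list of combinations.
--     Args:
--         combinations_string (str): The string containing combinations.
--     Returns:
--         list: A list of combinations.
--     """
--     combinations = combinations_string.split('-')
--     parsed_combinations = []
--     for combination in combinations:
--         parsed_combination = []
--         if combination.startswith("['") and combination.endswith("']"):
--             words = combination[2:-2].split("', '")
--             parsed_combination.extend(words)
--         else:
--             parsed_combination.append(combination)
--         parsed_combinations.append(parsed_combination)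
--
--     generated_combinations = list(itertools.product(*parsed_combinations))
--     generated_combinations = ['-'.join(combination)
--                               for combination in generated_combinations]
--     return generated_combinations
-- ===== SOURCE B (Python) =====
-- def parse_combinations(combinations_string):
--     groups = [part[2:-2].split("', '")
--               if part.startswith("['") and part.endswith("']") else [part]
--               for part in combinations_string.split('-')]
--     acc = list(groups[0])
--     for group in groups[1:]:
--         acc = [prefix + '-' + word for prefix in acc for word in group]
--     return acc
-- ===== Notes on version B (the rewrite author's own statement) =====
-- stated objective: simpler
-- what changed: Replaces itertools.product over tuples plus a separate join pass with a single incremental fold that maintains already-joined dash-separated prefix strings, extending them group by group.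
import Mathlib
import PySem

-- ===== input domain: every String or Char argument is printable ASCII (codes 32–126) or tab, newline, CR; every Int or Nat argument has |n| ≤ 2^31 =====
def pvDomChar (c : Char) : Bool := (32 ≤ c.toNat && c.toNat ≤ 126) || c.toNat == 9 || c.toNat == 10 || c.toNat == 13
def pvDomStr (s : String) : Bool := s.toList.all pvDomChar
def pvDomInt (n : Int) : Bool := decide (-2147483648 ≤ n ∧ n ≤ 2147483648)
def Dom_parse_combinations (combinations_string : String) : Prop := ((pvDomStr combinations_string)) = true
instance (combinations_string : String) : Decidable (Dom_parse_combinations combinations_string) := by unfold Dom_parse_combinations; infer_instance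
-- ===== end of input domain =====

-- B replaces itertools.product + a separate '-'.join pass with one incremental fold over
-- already-joined prefix strings; objective: simpler (one fused pass, no tuples).

-- ===== PORT A =====
-- itertools.product(*lists) as a list of lists (leftmost varies slowest), per A's use
def pvProduct : List (List String) → List (List String)
  | [] => [[]]
  | g :: gs => g.flatMap (fun x => (pvProduct gs).map (fun t => x :: t))

def parse_combinations (combinations_string : String) : List String :=
  -- combinations = combinations_string.split('-')  (sep ≠ "": split? is always some)
  -- parsed_combinations: a fold appending one parsed_combination per piece
  -- generated_combinations = itertools.product(*parsed_combinations), then '-'.join each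
  (pvProduct
    (((PySem.Str.split? combinations_string "-").getD []).foldl
      (fun acc combination =>
        acc ++
          [if PySem.Str.startswith combination "['" && PySem.Str.endswith combination "']" then
              -- parsed_combination = [] then .extend(words)
              [] ++ (PySem.Str.split? (PySem.Str.slice combination (some 2) (some (-2))) "', '").getD []
            else
              -- parsed_combination = [] then .append(combination)
              [] ++ [combination]])
      [])).map (fun combination => PySem.Str.join "-" combination)

-- ===== PORT B =====
def pvParseGroup (part : String) : List String :=
  if PySem.Str.startswith part "['" && PySem.Str.endswith part "']" then
    (PySem.Str.split? (PySem.Str.slice part (some 2) (some (-2))) "', '").getD []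
  else
    [part]

def parse_combinations_alt (combinations_string : String) : List String :=
  let groups := ((PySem.Str.split? combinations_string "-").getD []).map pvParseGroup
  match groups with
  | [] => []  -- unreachable: str.split always yields at least one piece
  | g0 :: rest =>
    rest.foldl (fun acc group =>
      acc.flatMap (fun pre => group.map (fun word => pre ++ "-" ++ word))) g0

-- ===== PRECONDITION & SPEC =====
def Spec_parse_combinations (combinations_string : String) (out : List String) : Prop := out = parse_combinations_alt combinations_string
instance (combinations_string : String) (out : List String) : Decidable (Spec_parse_combinations combinations_string out) := by unfold Spec_parse_combinations; infer_instance

-- ===== CLAIM (what is proved, stated in full; the proofs are below) =====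
def Claim_equal_parse_combinations : Prop := ∀ (combinations_string : String), Dom_parse_combinations combinations_string → Spec_parse_combinations combinations_string (parse_combinations combinations_string)

-- ===== LEMMAS AND PROOFS =====

-- the tail of a joined tuple: "-" before each word
def pvTail (t : List String) : String := t.foldr (fun w r => "-" ++ w ++ r) ""

theorem pv_go_ne_nil (sep : List Char) (fuel : Nat) (s cur : List Char) (acc : List (List Char)) :
    PySem.Chars.splitOn.go sep fuel s cur acc ≠ [] := by
  induction fuel generalizing s cur acc with
  | zero => simp [PySem.Chars.splitOn.go]
  | succ n ih =>
    cases s with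
    | nil => simp [PySem.Chars.splitOn.go]
    | cons c rest =>
      rw [PySem.Chars.splitOn.go]
      split_ifs <;> apply ih

theorem pv_split_ne_nil (s : String) :
    (PySem.Str.split? s "-").getD [] ≠ [] := by
  simp only [PySem.Str.split?, PySem.Chars.split?, PySem.Chars.splitOn]
  simp only [List.isEmpty_iff]
  · intro h
    exact pv_go_ne_nil _ _ _ _ _ (by simpa using congrArg (List.map String.toList) h)

theorem pv_foldl_push {α β : Type} (f : α → β) (l : List α) (acc : List β) :
    l.foldl (fun a c => a ++ [f c]) acc = acc ++ l.map f := by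
  induction l generalizing acc with
  | nil => simp
  | cons c cs ih => simp [ih]

theorem pv_join_cons (x : String) (t : List String) :
    PySem.Str.join "-" (x :: t) = x ++ pvTail t := by
  induction t generalizing x with
  | nil =>
    apply String.toList_inj.mp
    simp [PySem.Str.join, PySem.Chars.join, List.intercalate, pvTail]
  | cons w t ih =>
    apply String.toList_inj.mp
    rw [PySem.Str.toList_join, List.map_cons, List.map_cons, PySem.Chars.join_cons_cons]
    have h := congrArg String.toList (ih w)
    rw [PySem.Str.toList_join, List.map_cons] at h
    have hsep : "-".toList = ['-'] := rfl
    rw [hsep] at h ⊢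
    rw [h]
    simp [pvTail, String.toList_append, String.append_assoc]

theorem pv_fold_prod (gs : List (List String)) (acc : List String) :
    gs.foldl (fun acc group =>
      acc.flatMap (fun pre => group.map (fun word => pre ++ "-" ++ word))) acc
      = acc.flatMap (fun p => (pvProduct gs).map (fun t => p ++ pvTail t)) := by
  induction gs generalizing acc with
  | nil => simp [pvProduct, pvTail]
  | cons g gs ih =>
    rw [List.foldl_cons, ih]
    simp only [pvProduct, List.map_flatMap, List.flatMap_assoc, List.map_map, List.flatMap_map]
    congr 1
    funext p
    congr 1
    funext w
    congr 1
    funext t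
    show (p ++ "-" ++ w) ++ pvTail t = p ++ pvTail (w :: t)
    simp [pvTail, String.append_assoc]

theorem pv_map_join_product (g0 : List String) (gs : List (List String)) :
    (pvProduct (g0 :: gs)).map (fun c => PySem.Str.join "-" c)
      = g0.flatMap (fun p => (pvProduct gs).map (fun t => p ++ pvTail t)) := by
  simp only [pvProduct, List.map_flatMap, List.map_map]
  congr 1
  funext x
  congr 1
  funext t
  exact pv_join_cons x t

-- ===== VERDICT (by name: the statement is the Claim_ definition above) =====
theorem pv_A_eq (s : String) : parse_combinations s =
    (pvProduct (((PySem.Str.split? s "-").getD []).map pvParseGroup)).map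
      (fun c => PySem.Str.join "-" c) := by
  have hgrp : (fun c : String =>
      if PySem.Str.startswith c "['" && PySem.Str.endswith c "']" then
        [] ++ (PySem.Str.split? (PySem.Str.slice c (some 2) (some (-2))) "', '").getD []
      else [] ++ [c]) = pvParseGroup := by
    funext c
    unfold pvParseGroup
    rw [List.nil_append, List.nil_append]
  unfold parse_combinations
  rw [pv_foldl_push, List.nil_append, hgrp]

-- ===== VERDICT (by name: the statement is the Claim_ definition above) =====
theorem parse_combinations_spec : Claim_equal_parse_combinations := by
  intro s _
  unfold Spec_parse_combinations
  rw [pv_A_eq]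
  have hB : parse_combinations_alt s =
      (match ((PySem.Str.split? s "-").getD []).map pvParseGroup with
        | [] => ([] : List String)
        | g0 :: rest => rest.foldl (fun acc group =>
            acc.flatMap (fun pre => group.map (fun word => pre ++ "-" ++ word))) g0) := rfl
  rw [hB]
  obtain ⟨c0, cs, hc⟩ := List.exists_cons_of_ne_nil (pv_split_ne_nil s)
  rw [hc, List.map_cons]
  show (pvProduct (pvParseGroup c0 :: List.map pvParseGroup cs)).map (fun c => PySem.Str.join "-" c)
      = (List.map pvParseGroup cs).foldl (fun acc group =>
          acc.flatMap (fun pre => group.map (fun word => pre ++ "-" ++ word))) (pvParseGroup c0)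
  rw [pv_fold_prod]
  exact pv_map_join_product _ _
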